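-- pv_equiv track=rewrite | github.com/MgShepherd/AdventOfCode2019 | aoc/problems/problem6.py | get_orbital_steps
-- ===== SOURCE A (Python) =====
-- def get_orbital_steps(
--     direct_orbits: dict[str, list[str]],
--     orbit_sources: dict[str, str],
--     visited_paths: set[str],
--     current: str,
--     dest: str,
--     steps_taken: int,
-- ) -> int:
--     visited_paths.add(current)
--     if current not in direct_orbits:
--         return -1
--     elif dest in direct_orbits[current]:
--         return steps_taken + 1
--
--     for element in direct_orbits[current]:
--         if element in visited_paths:
--             continue
--
--         if (
--             result_steps := get_orbital_steps(
--                 direct_orbits,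
--                 orbit_sources,
--                 visited_paths,
--                 element,
--                 dest,
--                 steps_taken + 1,
--             )
--         ) != -1:
--             return result_steps
--
--     if orbit_sources[current] in visited_paths:
--         return -1
--     return get_orbital_steps(
--         direct_orbits,
--         orbit_sources,
--         visited_paths,
--         orbit_sources[current],
--         dest,
--         steps_taken + 1,
--     )
-- ===== SOURCE B (Python) =====
-- def _expand(direct_orbits, orbit_sources, visited_paths, dest, node, steps, stack):
--     """Visit node: mark it, return steps+1 if dest is a direct child; otherwise
--     push its parent and then its children (children end up on top, in order)
--     and report -1, the search's not-found code."""
--     visited_paths.add(node)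
--     children = direct_orbits.get(node)
--     if children is None:
--         return -1
--     if dest in children:
--         return steps + 1
--     parent = orbit_sources.get(node)
--     if parent is not None:
--         stack.append((parent, steps + 1))
--     for child in reversed(children):
--         stack.append((child, steps + 1))
--     return -1
--
--
-- def get_orbital_steps(
--     direct_orbits,
--     orbit_sources,
--     visited_paths,
--     current,
--     dest,
--     steps_taken,
-- ):
--     stack = []
--     hit = _expand(direct_orbits, orbit_sources, visited_paths, dest, current, steps_taken, stack)
--     while hit == -1 and stack:
--         node, steps = stack.pop()
--         if node not in visited_paths:
--             hit = _expand(direct_orbits, orbit_sources, visited_paths, dest, node, steps, stack)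
--     return hit
-- ===== Notes on version B (the rewrite author's own statement) =====
-- stated objective: alternative
-- what changed: Replaces A's recursive DFS (implicit call-stack, early-return propagation of non -1 results) by an iterative search driven by an explicit stack of (node, steps) frames with pop-time visited checks, a single expand step, and the same -1 not-found code, preserving A's exact traversal order and results.
-- outside the precondition, e.g. on get_orbital_steps({'A': ['C'], 'C': ['B']}, {'A': 'R'}, set(), 'A', 'B', 0): A returns 2, B returns 2
import Mathlib
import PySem

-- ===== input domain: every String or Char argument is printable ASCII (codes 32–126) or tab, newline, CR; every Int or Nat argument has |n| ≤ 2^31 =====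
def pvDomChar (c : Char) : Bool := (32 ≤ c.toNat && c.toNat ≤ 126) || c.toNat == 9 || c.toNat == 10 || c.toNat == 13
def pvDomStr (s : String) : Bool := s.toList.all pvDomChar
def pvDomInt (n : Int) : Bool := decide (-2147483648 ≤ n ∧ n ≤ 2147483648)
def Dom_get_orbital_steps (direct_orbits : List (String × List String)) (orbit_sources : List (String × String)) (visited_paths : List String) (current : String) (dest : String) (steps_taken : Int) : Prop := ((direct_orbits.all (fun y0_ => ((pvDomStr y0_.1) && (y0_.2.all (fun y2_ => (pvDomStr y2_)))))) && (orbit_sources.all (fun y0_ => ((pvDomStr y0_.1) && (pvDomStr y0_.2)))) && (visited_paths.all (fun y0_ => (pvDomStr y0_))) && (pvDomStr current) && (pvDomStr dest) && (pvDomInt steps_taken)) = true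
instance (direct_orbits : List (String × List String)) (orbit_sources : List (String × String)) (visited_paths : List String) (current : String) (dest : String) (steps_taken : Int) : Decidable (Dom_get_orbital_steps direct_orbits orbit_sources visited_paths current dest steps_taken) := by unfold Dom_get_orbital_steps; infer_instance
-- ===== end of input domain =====

-- B replaces A's recursive DFS by an explicit-stack loop (same traversal order, same
-- -1 not-found code); equivalence is about the RETURN value (both Pythons also mark
-- the same nodes in the caller's visited_paths set).

-- ===== PORT A =====
-- A's recursion threads the (mutated) visited set through and returns it alongside the
-- result.  The Nat fuel only makes the recursion total: every recursive call enters a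
-- node that is not yet visited and is drawn from the children lists or the orbit-source
-- values, so the fuel chosen in get_orbital_steps below is never exhausted.
mutual
def goA (d : List (String × List String)) (os : List (String × String)) (dest : String) : Nat → List String → String → Int → Int × List String
  | 0, v, _, _ => (-1, v)
  | f + 1, v, node, steps =>
    let v1 := PySem.Set.add v node
    match List.lookup node d with
    | none => (-1, v1)
    | some ch =>
      if dest ∈ ch then (steps + 1, v1)
      else
        match loopA d os dest f v1 ch steps with
        | (some r, v2) => (r, v2)
        | (none, v2) =>
          match List.lookup node os with
          | none => (-1, v2)  -- Python raises KeyError here; excluded by Pre_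
          | some p => if p ∈ v2 then (-1, v2) else goA d os dest f v2 p (steps + 1)
  termination_by f v node steps => (f, 0)

-- the 'for element in direct_orbits[current]' loop of A, with its early return (some r)
def loopA (d : List (String × List String)) (os : List (String × String)) (dest : String) : Nat → List String → List String → Int → Option Int × List String
  | _, v, [], _ => (none, v)
  | f, v, e :: es, steps =>
    if e ∈ v then loopA d os dest f v es steps
    else
      match goA d os dest f v e (steps + 1) with
      | (r, v') => if r ≠ -1 then (some r, v') else loopA d os dest f v' es steps
  termination_by f v ch steps => (f, ch.length + 1)
end

def get_orbital_steps (direct_orbits : List (String × List String)) (orbit_sources : List (String × String)) (visited_paths : List String) (current : String) (dest : String) (steps_taken : Int) : Int :=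
  (goA direct_orbits orbit_sources dest ((direct_orbits.flatMap Prod.snd).length + orbit_sources.length + 2) visited_paths current steps_taken).1

-- ===== PORT B =====
-- B's _expand: mark node, answer steps+1 if dest is a direct child, else push parent
-- then children (children end up on top, in order) and answer -1 (not found).
def expandB (d : List (String × List String)) (os : List (String × String)) (dest : String) (v : List String) (node : String) (steps : Int) (stack : List (String × Int)) : Int × List String × List (String × Int) :=
  let v1 := PySem.Set.add v node
  match List.lookup node d with
  | none => (-1, v1, stack)
  | some ch =>
    if dest ∈ ch then (steps + 1, v1, stack)
    else
      let stack1 := match List.lookup node os with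
        | none => stack
        | some p => (p, steps + 1) :: stack
      (-1, v1, ch.reverse.foldl (fun st c => (c, steps + 1) :: st) stack1)

-- B's while loop; head of the list is the top of the Python stack.  The Nat fuel only
-- makes the loop total (it bounds the number of pops; the fuel chosen below suffices).
def loopB (d : List (String × List String)) (os : List (String × String)) (dest : String) : Nat → Int → List String → List (String × Int) → Int
  | 0, hit, _, _ => hit
  | f + 1, hit, v, stack =>
    if hit = -1 then
      match stack with
      | [] => hit
      | (node, steps) :: rest =>
        if node ∈ v then loopB d os dest f (-1) v rest
        else
          match expandB d os dest v node steps rest with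
          | (h, v', st') => loopB d os dest f h v' st'
    else hit

def get_orbital_steps_alt (direct_orbits : List (String × List String)) (orbit_sources : List (String × String)) (visited_paths : List String) (current : String) (dest : String) (steps_taken : Int) : Int :=
  let C := (direct_orbits.flatMap Prod.snd ++ orbit_sources.map Prod.snd).length
  match expandB direct_orbits orbit_sources dest visited_paths current steps_taken [] with
  | (h, v1, st1) => loopB direct_orbits orbit_sources dest ((C + 1) * (C + 1) + 1) h v1 st1

-- ===== PRECONDITION & SPEC =====
-- Pre_ excludes inputs on which A can raise KeyError: an orbiting node (a key of
-- direct_orbits) with no entry in orbit_sources, looked up once that node's children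
-- are exhausted.  It admits every input whose start node is absent from direct_orbits
-- or has dest as a direct child (A answers before any source lookup), or whose
-- direct_orbits keys all have a source.  This is slightly conservative: on excluded
-- inputs where the unsourced node is never reached A still returns — and B returns
-- the same value there (see claim.json "cites").
def Pre_get_orbital_steps (direct_orbits : List (String × List String)) (orbit_sources : List (String × String)) (visited_paths : List String) (current : String) (dest : String) (steps_taken : Int) : Prop :=
  ((List.lookup current direct_orbits).all (fun ch => decide (dest ∈ ch))
    || direct_orbits.all (fun p => (List.lookup p.1 orbit_sources).isSome)) = true
instance (direct_orbits : List (String × List String)) (orbit_sources : List (String × String)) (visited_paths : List String) (current : String) (dest : String) (steps_taken : Int) : Decidable (Pre_get_orbital_steps direct_orbits orbit_sources visited_paths current dest steps_taken) := by unfold Pre_get_orbital_steps; infer_instance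

def pvWitness_get_orbital_steps : (List (String × List String)) × (List (String × String)) × List String × String × String × Int :=
  ([("A", ["B"])], [("A", "A")], [], "A", "B", (0 : Int))

def Spec_get_orbital_steps (direct_orbits : List (String × List String)) (orbit_sources : List (String × String)) (visited_paths : List String) (current : String) (dest : String) (steps_taken : Int) (out : Int) : Prop := out = get_orbital_steps_alt direct_orbits orbit_sources visited_paths current dest steps_taken
instance (direct_orbits : List (String × List String)) (orbit_sources : List (String × String)) (visited_paths : List String) (current : String) (dest : String) (steps_taken : Int) (out : Int) : Decidable (Spec_get_orbital_steps direct_orbits orbit_sources visited_paths current dest steps_taken out) := by unfold Spec_get_orbital_steps; infer_instance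

-- ===== CLAIM (what is proved, stated in full; the proofs are below) =====
def Claim_equal_get_orbital_steps : Prop := ∀ (direct_orbits : List (String × List String)) (orbit_sources : List (String × String)) (visited_paths : List String) (current : String) (dest : String) (steps_taken : Int), Dom_get_orbital_steps direct_orbits orbit_sources visited_paths current dest steps_taken → Pre_get_orbital_steps direct_orbits orbit_sources visited_paths current dest steps_taken → Spec_get_orbital_steps direct_orbits orbit_sources visited_paths current dest steps_taken (get_orbital_steps direct_orbits orbit_sources visited_paths current dest steps_taken)

-- ===== LEMMAS AND PROOFS =====

-- the universe of nodes any recursive call / stack push can mention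
def pvW (d : List (String × List String)) (os : List (String × String)) : List String :=
  d.flatMap Prod.snd ++ os.map Prod.snd

-- how many universe nodes are still unvisited
def pvMu (d : List (String × List String)) (os : List (String × String)) (v : List String) : Nat :=
  ((pvW d os).toFinset \ v.toFinset).card

-- every node on the stack lies in the universe
def pvSW (d : List (String × List String)) (os : List (String × String)) (stack : List (String × Int)) : Prop :=
  ∀ p ∈ stack, p.1 ∈ pvW d os

-- fuel bound for loopB from a given state
def pvBnd (d : List (String × List String)) (os : List (String × String)) (v : List String) (stack : List (String × Int)) : Nat :=
  stack.length + ((pvW d os).length + 1) * pvMu d os v + 1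

-- canonical (fuel-free) value of B's loop from a given state
def pvLB (d : List (String × List String)) (os : List (String × String)) (dest : String) (v : List String) (stack : List (String × Int)) : Int :=
  loopB d os dest (pvBnd d os v stack) (-1) v stack

theorem pvLookup_mem {α : Type} (l : List (String × α)) (a : String) (b : α) (h : List.lookup a l = some b) : (a, b) ∈ l := by
  induction l with
  | nil => simp [List.lookup] at h
  | cons p t ih =>
    rw [List.lookup] at h
    by_cases hc : a == p.1
    · simp [hc] at h
      have h1 : a = p.1 := eq_of_beq hc
      have : p = (a, b) := by cases p; simp_all
      simp [this]
    · simp [hc] at h; right; exact ih h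

theorem pvSubset_add (v : List String) (n : String) : v ⊆ PySem.Set.add v n := by
  intro x hx; rw [PySem.Set.mem_add]; exact Or.inl hx

theorem pvToFinset_add (v : List String) (n : String) : (PySem.Set.add v n).toFinset = insert n v.toFinset := by
  ext x; simp [List.mem_toFinset, PySem.Set.mem_add, or_comm]

theorem pvMu_le (d : List (String × List String)) (os : List (String × String)) (v : List String) : pvMu d os v ≤ (pvW d os).length := by
  unfold pvMu
  calc ((pvW d os).toFinset \ v.toFinset).card ≤ (pvW d os).toFinset.card := Finset.card_le_card Finset.sdiff_subset
    _ ≤ (pvW d os).length := (pvW d os).toFinset_card_le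

theorem pvMu_mono (d : List (String × List String)) (os : List (String × String)) (v v' : List String) (h : v ⊆ v') : pvMu d os v' ≤ pvMu d os v := by
  apply Finset.card_le_card
  apply Finset.sdiff_subset_sdiff (Finset.Subset.refl _)
  intro x hx; simp only [List.mem_toFinset] at *; exact h hx

theorem pvMu_add_lt (d : List (String × List String)) (os : List (String × String)) (v : List String) (n : String) (h1 : n ∈ pvW d os) (h2 : n ∉ v) :
    pvMu d os (PySem.Set.add v n) + 1 ≤ pvMu d os v := by
  unfold pvMu
  rw [pvToFinset_add, Finset.sdiff_insert, Finset.card_erase_of_mem (by simp [Finset.mem_sdiff, List.mem_toFinset, h1, h2])]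
  have : 0 < ((pvW d os).toFinset \ v.toFinset).card :=
    Finset.card_pos.mpr ⟨n, by simp [Finset.mem_sdiff, List.mem_toFinset, h1, h2]⟩
  omega

theorem pvChild_mem_W (d : List (String × List String)) (os : List (String × String)) (node : String) (ch : List String) (c : String)
    (h : List.lookup node d = some ch) (hc : c ∈ ch) : c ∈ pvW d os := by
  unfold pvW
  apply List.mem_append_left
  exact List.mem_flatMap.mpr ⟨(node, ch), pvLookup_mem d node ch h, hc⟩

theorem pvParent_mem_W (d : List (String × List String)) (os : List (String × String)) (node p : String)
    (h : List.lookup node os = some p) : p ∈ pvW d os := by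
  unfold pvW
  apply List.mem_append_right
  exact List.mem_map.mpr ⟨(node, p), pvLookup_mem os node p h, rfl⟩

theorem pvCh_len_le_mem (d : List (String × List String)) (node : String) (ch : List String)
    (hm : (node, ch) ∈ d) : ch.length ≤ (d.flatMap Prod.snd).length := by
  induction d with
  | nil => simp at hm
  | cons p t ih =>
    simp only [List.flatMap_cons, List.length_append]
    rcases List.mem_cons.mp hm with hm' | hm'
    · simp [← hm']
    · have := ih hm'; omega

theorem pvCh_len_le (d : List (String × List String)) (node : String) (ch : List String)
    (h : List.lookup node d = some ch) : ch.length ≤ (d.flatMap Prod.snd).length :=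
  pvCh_len_le_mem d node ch (pvLookup_mem d node ch h)

-- visited only grows
theorem pvMono (d : List (String × List String)) (os : List (String × String)) (dest : String) :
    ∀ f, (∀ v (n : String) (s : Int), v ⊆ (goA d os dest f v n s).2) ∧
      (∀ v (ch : List String) (s : Int), v ⊆ (loopA d os dest f v ch s).2) := by
  intro f
  induction f with
  | zero =>
    have hg : ∀ v (n : String) (s : Int), v ⊆ (goA d os dest 0 v n s).2 := by
      intro v n s; simp [goA]
    refine ⟨hg, ?_⟩
    intro v ch s
    induction ch generalizing v with
    | nil => simp [loopA]
    | cons e es ih =>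
      rw [loopA]
      by_cases he : e ∈ v
      · simp only [he, if_true]; exact ih v
      · simp only [he, if_false, goA]
        simp only [show ¬((-1 : Int) ≠ -1) by simp, if_false]
        exact ih v
  | succ f ihf =>
    obtain ⟨ihg, ihl⟩ := ihf
    have hg : ∀ v (n : String) (s : Int), v ⊆ (goA d os dest (f + 1) v n s).2 := by
      intro v n s
      rw [goA]
      have hv1 : v ⊆ PySem.Set.add v n := pvSubset_add v n
      cases hlk : List.lookup n d with
      | none => simpa using hv1
      | some ch =>
        simp only []
        by_cases hdest : dest ∈ ch
        · simp only [hdest, if_true]; exact hv1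
        · simp only [hdest, if_false]
          cases hlp : loopA d os dest f (PySem.Set.add v n) ch s with
          | mk o v2 =>
            have hv2 : v ⊆ v2 := by
              have := ihl (PySem.Set.add v n) ch s
              rw [hlp] at this
              exact hv1.trans this
            cases o with
            | some r => exact hv2
            | none =>
              cases hlo : List.lookup n os with
              | none => exact hv2
              | some p =>
                simp only []
                by_cases hp : p ∈ v2
                · simp only [hp, if_true]; exact hv2
                · simp only [hp, if_false]; exact hv2.trans (ihg v2 p (s + 1))
    refine ⟨hg, ?_⟩
    intro v ch s
    induction ch generalizing v with
    | nil => simp [loopA]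
    | cons e es ih =>
      rw [loopA]
      by_cases he : e ∈ v
      · simp only [he, if_true]; exact ih v
      · simp only [he, if_false]
        cases hga : goA d os dest (f + 1) v e (s + 1) with
        | mk r v1 =>
          have hv1 : v ⊆ v1 := by have := hg v e (s + 1); rw [hga] at this; exact this
          by_cases hr : r ≠ -1
          · rw [if_pos hr]; exact hv1
          · rw [if_neg hr]; exact hv1.trans (ih v1)

theorem pvMonoA (d : List (String × List String)) (os : List (String × String)) (dest : String) :
    ∀ f v (n : String) (s : Int), v ⊆ (goA d os dest f v n s).2 := fun f => (pvMono d os dest f).1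
theorem pvMonoL (d : List (String × List String)) (os : List (String × String)) (dest : String) :
    ∀ f v (ch : List String) (s : Int), v ⊆ (loopA d os dest f v ch s).2 := fun f => (pvMono d os dest f).2

theorem pvLoopA_all_skip (d : List (String × List String)) (os : List (String × String)) (dest : String)
    (f : Nat) : ∀ (ch : List String) (v : List String) (s : Int), (∀ e ∈ ch, e ∈ v) → loopA d os dest f v ch s = (none, v) := by
  intro ch
  induction ch with
  | nil => intro v s _; cases f <;> simp [loopA]
  | cons e es ih =>
    intro v s h
    rw [loopA]
    simp only [h e (by simp), if_true]
    exact ih v s (fun x hx => h x (by simp [hx]))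

-- fuel irrelevance for A's recursion
theorem pvGoA_succ (d : List (String × List String)) (os : List (String × String)) (dest : String) :
    ∀ f, (∀ v (n : String) (s : Int), pvMu d os (PySem.Set.add v n) + 1 ≤ f → goA d os dest (f + 1) v n s = goA d os dest f v n s) ∧
      (∀ v (ch : List String) (s : Int), (∀ c ∈ ch, c ∈ pvW d os) → pvMu d os v ≤ f → loopA d os dest (f + 1) v ch s = loopA d os dest f v ch s) := by
  intro f
  induction f with
  | zero =>
    constructor
    · intro v n s h; omega
    · intro v ch s hch hmu
      have hsub : ∀ e ∈ ch, e ∈ v := by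
        intro e he
        have h0 : ((pvW d os).toFinset \ v.toFinset) = ∅ := Finset.card_eq_zero.mp (Nat.le_zero.mp hmu)
        have := Finset.eq_empty_iff_forall_notMem.mp h0 e
        simp only [Finset.mem_sdiff, List.mem_toFinset, not_and, not_not] at this
        exact this (hch e he)
      rw [pvLoopA_all_skip d os dest 1 ch v s hsub, pvLoopA_all_skip d os dest 0 ch v s hsub]
  | succ f ihf =>
    obtain ⟨ihP, ihQ⟩ := ihf
    have hP : ∀ v (n : String) (s : Int), pvMu d os (PySem.Set.add v n) + 1 ≤ f + 1 → goA d os dest (f + 1 + 1) v n s = goA d os dest (f + 1) v n s := by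
      intro v n s h
      rw [goA, goA]
      cases hlk : List.lookup n d with
      | none => rfl
      | some ch =>
        simp only []
        by_cases hdest : dest ∈ ch
        · simp only [hdest, if_true]
        · simp only [hdest, if_false]
          have hQ : loopA d os dest (f + 1) (PySem.Set.add v n) ch s = loopA d os dest f (PySem.Set.add v n) ch s :=
            ihQ (PySem.Set.add v n) ch s (fun c hc => pvChild_mem_W d os n ch c hlk hc) (by omega)
          rw [hQ]
          cases hlp : loopA d os dest f (PySem.Set.add v n) ch s with
          | mk o v2 =>
            cases o with
            | some r => rfl
            | none =>
              cases hlo : List.lookup n os with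
              | none => rfl
              | some p =>
                simp only []
                by_cases hp : p ∈ v2
                · simp only [hp, if_true]
                · simp only [hp, if_false]
                  apply ihP v2 p (s + 1)
                  have hpW : p ∈ pvW d os := pvParent_mem_W d os n p hlo
                  have h1 : pvMu d os (PySem.Set.add v2 p) + 1 ≤ pvMu d os v2 := pvMu_add_lt d os v2 p hpW hp
                  have h2 : pvMu d os v2 ≤ pvMu d os (PySem.Set.add v n) := by
                    apply pvMu_mono
                    have := pvMonoL d os dest f (PySem.Set.add v n) ch s
                    rw [hlp] at this
                    exact this
                  omega
    refine ⟨hP, ?_⟩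
    intro v ch s hch hmu
    induction ch generalizing v with
    | nil => simp [loopA]
    | cons e es ih =>
      rw [loopA, loopA]
      by_cases he : e ∈ v
      · simp only [he, if_true]
        exact ih v (fun x hx => hch x (by simp [hx])) hmu
      · simp only [he, if_false]
        have hgo : goA d os dest (f + 1 + 1) v e (s + 1) = goA d os dest (f + 1) v e (s + 1) := by
          apply hP
          have : pvMu d os (PySem.Set.add v e) + 1 ≤ pvMu d os v :=
            pvMu_add_lt d os v e (hch e (by simp)) he
          omega
        rw [hgo]
        cases hga : goA d os dest (f + 1) v e (s + 1) with
        | mk r v1 =>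
          by_cases hr : r ≠ -1
          · rw [if_pos hr, if_pos hr]
          · rw [if_neg hr, if_neg hr]
            apply ih v1 (fun x hx => hch x (by simp [hx]))
            have hv1 : v ⊆ v1 := by
              have := pvMonoA d os dest (f + 1) v e (s + 1)
              rw [hga] at this
              exact this
            exact le_trans (pvMu_mono d os v v1 hv1) hmu

theorem pvGoA_add (d : List (String × List String)) (os : List (String × String)) (dest : String)
    (k : Nat) (v : List String) (n : String) (s : Int) :
    goA d os dest ((pvW d os).length + 1 + k) v n s = goA d os dest ((pvW d os).length + 1) v n s := by
  induction k with
  | zero => rfl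
  | succ k ih =>
    have hP := (pvGoA_succ d os dest ((pvW d os).length + 1 + k)).1
    have h1 : pvMu d os (PySem.Set.add v n) + 1 ≤ (pvW d os).length + 1 + k := by
      have := pvMu_le d os (PySem.Set.add v n)
      omega
    calc goA d os dest ((pvW d os).length + 1 + (k + 1)) v n s
        = goA d os dest ((pvW d os).length + 1 + k + 1) v n s := by ring_nf
      _ = goA d os dest ((pvW d os).length + 1 + k) v n s := hP v n s h1
      _ = goA d os dest ((pvW d os).length + 1) v n s := ih

theorem pvGoA_fuel (d : List (String × List String)) (os : List (String × String)) (dest : String)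
    (f g : Nat) (v : List String) (n : String) (s : Int)
    (hf : (pvW d os).length + 1 ≤ f) (hg : (pvW d os).length + 1 ≤ g) :
    goA d os dest f v n s = goA d os dest g v n s := by
  obtain ⟨k1, rfl⟩ := Nat.exists_eq_add_of_le hf
  obtain ⟨k2, rfl⟩ := Nat.exists_eq_add_of_le hg
  rw [pvGoA_add d os dest k1 v n s, pvGoA_add d os dest k2 v n s]

theorem pvLoopA_some_ne (d : List (String × List String)) (os : List (String × String)) (dest : String)
    (f : Nat) : ∀ ch v s r v2, loopA d os dest f v ch s = (some r, v2) → r ≠ -1 := by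
  intro ch
  induction ch with
  | nil => intro v s r v2 h; simp [loopA] at h
  | cons e es ih =>
    intro v s r v2 h
    rw [loopA] at h
    by_cases he : e ∈ v
    · simp [he] at h; exact ih _ _ _ _ h
    · simp [he] at h
      by_cases hr : (goA d os dest f v e (s + 1)).1 = -1
      · simp [hr] at h; exact ih _ _ _ _ h
      · simp [hr] at h; rw [← h.1]; exact hr

theorem pvRevFoldl (steps : Int) : ∀ (ch : List String) (st : List (String × Int)),
    ch.reverse.foldl (fun st c => (c, steps + 1) :: st) st = ch.map (fun c => (c, steps + 1)) ++ st := by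
  intro ch
  induction ch with
  | nil => intro st; rfl
  | cons e es ih =>
    intro st
    simp only [List.reverse_cons, List.foldl_append, List.foldl_cons, List.foldl_nil, List.map_cons]
    rw [ih]
    rfl

-- after expanding an unvisited universe node, the stack stays inside the universe and
-- the loop bound strictly drops
theorem pvExpand_bound (d : List (String × List String)) (os : List (String × String)) (dest : String)
    (v : List String) (node : String) (steps : Int) (rest : List (String × Int))
    (hW : node ∈ pvW d os) (hv : node ∉ v) (hsw : pvSW d os rest) :
    pvSW d os (expandB d os dest v node steps rest).2.2 ∧
      pvBnd d os (expandB d os dest v node steps rest).2.1 (expandB d os dest v node steps rest).2.2 + 1 ≤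
        pvBnd d os v ((node, steps) :: rest) := by
  have hmu : pvMu d os (PySem.Set.add v node) + 1 ≤ pvMu d os v := pvMu_add_lt d os v node hW hv
  rw [expandB]
  cases hlk : List.lookup node d with
  | none =>
    refine ⟨hsw, ?_⟩
    simp only [pvBnd, List.length_cons]
    have h2 : ((pvW d os).length + 1) * (pvMu d os (PySem.Set.add v node) + 1) ≤ ((pvW d os).length + 1) * pvMu d os v :=
      Nat.mul_le_mul_left _ hmu
    rw [Nat.mul_add] at h2
    omega
  | some ch =>
    simp only []
    by_cases hdest : dest ∈ ch
    · simp only [hdest, if_true]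
      refine ⟨hsw, ?_⟩
      simp only [pvBnd, List.length_cons]
      have h2 : ((pvW d os).length + 1) * (pvMu d os (PySem.Set.add v node) + 1) ≤ ((pvW d os).length + 1) * pvMu d os v :=
        Nat.mul_le_mul_left _ hmu
      rw [Nat.mul_add] at h2
      omega
    · simp only [hdest, if_false]
      rw [pvRevFoldl]
      have hchW : ∀ c ∈ ch, c ∈ pvW d os := fun c hc => pvChild_mem_W d os node ch c hlk hc
      have hchlen : ch.length ≤ (pvW d os).length := by
        have := pvCh_len_le d node ch hlk
        unfold pvW
        simp only [List.length_append]
        omega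
      have hkey : ∀ (stack1 : List (String × Int)), pvSW d os stack1 → stack1.length ≤ rest.length + 1 →
          pvSW d os (ch.map (fun c => (c, steps + 1)) ++ stack1) ∧
            pvBnd d os (PySem.Set.add v node) (ch.map (fun c => (c, steps + 1)) ++ stack1) + 1 ≤
              pvBnd d os v ((node, steps) :: rest) := by
        intro stack1 hsw1 hlen1
        constructor
        · intro p hp
          rcases List.mem_append.mp hp with hp | hp
          · obtain ⟨c, hc, rfl⟩ := List.mem_map.mp hp
            exact hchW c hc
          · exact hsw1 p hp
        · simp only [pvBnd, List.length_cons, List.length_append, List.length_map]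
          have h2 : ((pvW d os).length + 1) * (pvMu d os (PySem.Set.add v node) + 1) ≤ ((pvW d os).length + 1) * pvMu d os v :=
            Nat.mul_le_mul_left _ hmu
          rw [Nat.mul_add] at h2
          omega
      cases hlo : List.lookup node os with
      | none => exact hkey rest hsw (by omega)
      | some p =>
        apply hkey ((p, steps + 1) :: rest)
        · intro q hq
          rcases List.mem_cons.mp hq with hq | hq
          · rw [hq]; exact pvParent_mem_W d os node p hlo
          · exact hsw q hq
        · simp

-- fuel irrelevance for B's loop
theorem pvLoopB_succ (d : List (String × List String)) (os : List (String × String)) (dest : String) :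
    ∀ f (hit : Int) v stack, pvSW d os stack → pvBnd d os v stack ≤ f →
      loopB d os dest (f + 1) hit v stack = loopB d os dest f hit v stack := by
  intro f
  induction f with
  | zero => intro hit v stack _ hb; simp [pvBnd] at hb
  | succ f ih =>
    intro hit v stack hsw hb
    by_cases hh : hit = -1
    · subst hh
      cases stack with
      | nil => simp [loopB]
      | cons q rest =>
        obtain ⟨node, steps⟩ := q
        rw [loopB, loopB]
        simp only [if_pos rfl]
        by_cases hn : node ∈ v
        · simp only [hn, if_true]
          apply ih (-1) v rest (fun p hp => hsw p (by simp [hp]))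
          simp only [pvBnd, List.length_cons] at hb ⊢
          omega
        · simp only [hn, if_false]
          cases hex : expandB d os dest v node steps rest with
          | mk h' q' =>
            obtain ⟨v', st'⟩ := q'
            have hbd := pvExpand_bound d os dest v node steps rest (hsw (node, steps) (by simp)) hn (fun p hp => hsw p (by simp [hp]))
            rw [hex] at hbd
            dsimp only at hbd
            exact ih h' v' st' hbd.1 (by have := hbd.2; omega)
    · simp [loopB, hh]

theorem pvLoopB_add (d : List (String × List String)) (os : List (String × String)) (dest : String)
    (k : Nat) (hit : Int) (v : List String) (stack : List (String × Int)) (hsw : pvSW d os stack) :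
    loopB d os dest (pvBnd d os v stack + k) hit v stack = loopB d os dest (pvBnd d os v stack) hit v stack := by
  induction k with
  | zero => rfl
  | succ k ih =>
    calc loopB d os dest (pvBnd d os v stack + (k + 1)) hit v stack
        = loopB d os dest (pvBnd d os v stack + k + 1) hit v stack := by ring_nf
      _ = loopB d os dest (pvBnd d os v stack + k) hit v stack :=
          pvLoopB_succ d os dest (pvBnd d os v stack + k) hit v stack hsw (by omega)
      _ = loopB d os dest (pvBnd d os v stack) hit v stack := ih

theorem pvLoopB_eq_LB (d : List (String × List String)) (os : List (String × String)) (dest : String)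
    (f : Nat) (v : List String) (stack : List (String × Int)) (hsw : pvSW d os stack) (hf : pvBnd d os v stack ≤ f) :
    loopB d os dest f (-1) v stack = pvLB d os dest v stack := by
  obtain ⟨k, rfl⟩ := Nat.exists_eq_add_of_le hf
  exact pvLoopB_add d os dest k (-1) v stack hsw

theorem pvLoopB_hit (d : List (String × List String)) (os : List (String × String)) (dest : String)
    (f : Nat) (hit : Int) (v : List String) (stack : List (String × Int)) (h : hit ≠ -1) (hf : 1 ≤ f) :
    loopB d os dest f hit v stack = hit := by
  cases f with
  | zero => omega
  | succ g => rw [loopB.eq_def]; simp [h]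

theorem pvLB_nil (d : List (String × List String)) (os : List (String × String)) (dest : String) (v : List String) :
    pvLB d os dest v [] = -1 := by
  unfold pvLB
  have h : pvBnd d os v [] = (((pvW d os).length + 1) * pvMu d os v) + 1 := by simp [pvBnd]
  rw [h, loopB]
  simp

theorem pvBnd_cons (d : List (String × List String)) (os : List (String × String)) (v : List String)
    (node : String) (steps : Int) (rest : List (String × Int)) :
    pvBnd d os v ((node, steps) :: rest) = pvBnd d os v rest + 1 := by
  simp [pvBnd, List.length_cons]; omega

theorem pvLB_cons_skip (d : List (String × List String)) (os : List (String × String)) (dest : String)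
    (v : List String) (node : String) (steps : Int) (rest : List (String × Int))
    (hn : node ∈ v) :
    pvLB d os dest v ((node, steps) :: rest) = pvLB d os dest v rest := by
  unfold pvLB
  rw [pvBnd_cons, loopB]
  simp [hn]

theorem pvLB_cons_expand (d : List (String × List String)) (os : List (String × String)) (dest : String)
    (v : List String) (node : String) (steps : Int) (rest : List (String × Int))
    (hn : node ∉ v) (hW : node ∈ pvW d os) (hsw : pvSW d os rest) :
    pvLB d os dest v ((node, steps) :: rest) =
      (match expandB d os dest v node steps rest with
       | (h, v', st') => if h = -1 then pvLB d os dest v' st' else h) := by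
  unfold pvLB
  rw [pvBnd_cons, loopB]
  simp only [if_pos rfl, hn, if_false]
  cases hex : expandB d os dest v node steps rest with
  | mk h' q' =>
    obtain ⟨v', st'⟩ := q'
    have hbd := pvExpand_bound d os dest v node steps rest hW hn hsw
    rw [hex] at hbd
    dsimp only at hbd
    simp only []
    by_cases hh : h' = -1
    · subst hh
      rw [pvLoopB_eq_LB d os dest (pvBnd d os v rest) v' st' hbd.1 (by rw [pvBnd_cons] at hbd; omega)]
      rfl
    · rw [pvLoopB_hit d os dest (pvBnd d os v rest) h' v' st' hh (by simp [pvBnd])]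
      simp [hh]

-- the main simulation: expanding node (with continuation rest) equals running A's
-- recursion on node and continuing with rest on A's final visited set
theorem pvSIM (d : List (String × List String)) (os : List (String × String)) (dest : String)
    (hpre : ∀ p ∈ d, (List.lookup p.1 os).isSome = true) :
    ∀ k v (node : String) (steps : Int) rest, pvMu d os (PySem.Set.add v node) ≤ k → pvSW d os rest →
      (match expandB d os dest v node steps rest with
       | (h, v', st') => if h = -1 then pvLB d os dest v' st' else h)
      = (match goA d os dest ((pvW d os).length + 2) v node steps with
         | (r, v2) => if r = -1 then pvLB d os dest v2 rest else r) := by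
  intro k
  induction k using Nat.strong_induction_on with
  | _ k IH =>
  intro v node steps rest hk hsw
  have hFA : ((pvW d os).length + 2) = ((pvW d os).length + 1) + 1 := by omega
  rw [hFA, expandB, goA]
  cases hlk : List.lookup node d with
  | none => simp only []
  | some ch =>
    simp only []
    by_cases hdest : dest ∈ ch
    · simp only [hdest, if_true]
    · simp only [hdest, if_false]
      -- the parent lookup must succeed, by Pre_
      cases hlo : List.lookup node os with
      | none =>
        exfalso
        have := hpre (node, ch) (pvLookup_mem d node ch hlk)
        simp only [] at this
        rw [hlo] at this
        simp at this
      | some p =>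
        simp only []
        rw [pvRevFoldl]
        have hchW : ∀ c ∈ ch, c ∈ pvW d os := fun c hc => pvChild_mem_W d os node ch c hlk hc
        have hpW : p ∈ pvW d os := pvParent_mem_W d os node p hlo
        have hswP : pvSW d os ((p, steps + 1) :: rest) := by
          intro q hq
          rcases List.mem_cons.mp hq with hq | hq
          · rw [hq]; exact hpW
          · exact hsw q hq
        -- the children loop: popping the mapped children simulates A's for-loop
        have hloop : ∀ (ch' : List String), (∀ c ∈ ch', c ∈ pvW d os) → ∀ v', pvMu d os v' ≤ k →
            pvLB d os dest v' (ch'.map (fun c => (c, steps + 1)) ++ ((p, steps + 1) :: rest)) =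
              (match loopA d os dest ((pvW d os).length + 1) v' ch' steps with
               | (some r, _) => r
               | (none, v2) => pvLB d os dest v2 ((p, steps + 1) :: rest)) := by
          intro ch'
          induction ch' with
          | nil => intro _ v' _; simp [loopA]
          | cons e es ihe =>
            intro hch' v' hv'
            rw [loopA]
            by_cases he : e ∈ v'
            · simp only [List.map_cons, List.cons_append, he, if_true]
              rw [pvLB_cons_skip d os dest v' e (steps + 1) _ he]
              exact ihe (fun c hc => hch' c (by simp [hc])) v' hv'
            · simp only [List.map_cons, List.cons_append, he, if_false]
              have heW : e ∈ pvW d os := hch' e (by simp)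
              have hswTail : pvSW d os (es.map (fun c => (c, steps + 1)) ++ ((p, steps + 1) :: rest)) := by
                intro q hq
                rcases List.mem_append.mp hq with hq | hq
                · obtain ⟨c, hc, rfl⟩ := List.mem_map.mp hq
                  exact hch' c (by simp [hc])
                · exact hswP q hq
              rw [pvLB_cons_expand d os dest v' e (steps + 1) _ he heW hswTail]
              have hmuE : pvMu d os (PySem.Set.add v' e) < k := by
                have := pvMu_add_lt d os v' e heW he
                omega
              rw [IH (pvMu d os (PySem.Set.add v' e)) hmuE v' e (steps + 1) _ (le_refl _) hswTail]
              rw [pvGoA_fuel d os dest ((pvW d os).length + 2) ((pvW d os).length + 1) v' e (steps + 1) (by omega) (by omega)]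
              cases hga : goA d os dest ((pvW d os).length + 1) v' e (steps + 1) with
              | mk r v'' =>
                dsimp only
                by_cases hr : r = -1
                · subst hr
                  simp only [if_pos rfl, show ¬((-1 : Int) ≠ -1) by simp, if_false]
                  apply ihe (fun c hc => hch' c (by simp [hc])) v''
                  have hsubs : v' ⊆ v'' := by
                    have := pvMonoA d os dest ((pvW d os).length + 1) v' e (steps + 1)
                    rw [hga] at this
                    exact this
                  exact le_trans (pvMu_mono d os v' v'' hsubs) hv'
                · rw [if_neg hr, if_pos hr]
        have hmu1 : pvMu d os (PySem.Set.add v node) ≤ k := hk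
        rw [hloop ch hchW (PySem.Set.add v node) hmu1]
        cases hlp : loopA d os dest ((pvW d os).length + 1) (PySem.Set.add v node) ch steps with
        | mk o v2 =>
          cases o with
          | some r =>
            have hr : r ≠ -1 := pvLoopA_some_ne d os dest ((pvW d os).length + 1) ch (PySem.Set.add v node) steps r v2 hlp
            simp [hr]
          | none =>
            simp only []
            by_cases hp : p ∈ v2
            · simp only [hp, if_true, if_pos rfl]
              rw [pvLB_cons_skip d os dest v2 p (steps + 1) rest hp]
            · simp only [hp, if_false]
              have hsub2 : PySem.Set.add v node ⊆ v2 := by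
                have := pvMonoL d os dest ((pvW d os).length + 1) (PySem.Set.add v node) ch steps
                rw [hlp] at this
                exact this
              have hmu2 : pvMu d os (PySem.Set.add v2 p) < k := by
                have h1 := pvMu_add_lt d os v2 p hpW hp
                have h2 := pvMu_mono d os (PySem.Set.add v node) v2 hsub2
                omega
              rw [pvLB_cons_expand d os dest v2 p (steps + 1) rest hp hpW hsw]
              rw [IH (pvMu d os (PySem.Set.add v2 p)) hmu2 v2 p (steps + 1) rest (le_refl _) hsw]
              rw [pvGoA_fuel d os dest ((pvW d os).length + 2) ((pvW d os).length + 1) v2 p (steps + 1) (by omega) (by omega)]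
              simp only [if_true]

-- after any expansion (the start node need not lie in the universe) the stack stays
-- inside the universe and is short
theorem pvExpand_abs (d : List (String × List String)) (os : List (String × String)) (dest : String)
    (v : List String) (node : String) (steps : Int) (rest : List (String × Int)) (hsw : pvSW d os rest) :
    pvSW d os (expandB d os dest v node steps rest).2.2 ∧
      (expandB d os dest v node steps rest).2.2.length ≤ rest.length + (pvW d os).length + 1 := by
  rw [expandB]
  cases hlk : List.lookup node d with
  | none => exact ⟨hsw, by dsimp only; omega⟩
  | some ch =>
    simp only []
    by_cases hdest : dest ∈ ch
    · simp only [hdest, if_true]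
      exact ⟨hsw, by omega⟩
    · simp only [hdest, if_false]
      rw [pvRevFoldl]
      have hchW : ∀ c ∈ ch, c ∈ pvW d os := fun c hc => pvChild_mem_W d os node ch c hlk hc
      have hchlen : ch.length ≤ (pvW d os).length := by
        have := pvCh_len_le d node ch hlk
        unfold pvW
        simp only [List.length_append]
        omega
      cases hlo : List.lookup node os with
      | none =>
        constructor
        · intro q hq
          rcases List.mem_append.mp hq with hq | hq
          · obtain ⟨c, hc, rfl⟩ := List.mem_map.mp hq
            exact hchW c hc
          · exact hsw q hq
        · simp only [List.length_append, List.length_map]; omega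
      | some p =>
        constructor
        · intro q hq
          rcases List.mem_append.mp hq with hq | hq
          · obtain ⟨c, hc, rfl⟩ := List.mem_map.mp hq
            exact hchW c hc
          · rcases List.mem_cons.mp hq with hq | hq
            · rw [hq]; exact pvParent_mem_W d os node p hlo
            · exact hsw q hq
        · simp only [List.length_append, List.length_map, List.length_cons]; omega

-- ===== VERDICT (by name: the statement is the Claim_ definition above) =====
theorem get_orbital_steps_spec : Claim_equal_get_orbital_steps := by
  unfold Claim_equal_get_orbital_steps
  intro d os v cur dest steps _ hpre
  unfold Spec_get_orbital_steps
  unfold Pre_get_orbital_steps at hpre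
  rw [Bool.or_eq_true] at hpre
  have hC : (d.flatMap Prod.snd ++ os.map Prod.snd).length = (pvW d os).length := rfl
  have hlen : (d.flatMap Prod.snd).length + os.length + 2 = (pvW d os).length + 2 := by
    unfold pvW
    simp only [List.length_append, List.length_map]
  unfold get_orbital_steps get_orbital_steps_alt
  rw [hlen, hC]
  rcases hpre with hopt | hall
  · -- the start node answers immediately: absent from direct_orbits, or dest a direct child
    cases hlk : List.lookup cur d with
    | none =>
      rw [show (pvW d os).length + 2 = ((pvW d os).length + 1) + 1 from by omega, goA, expandB, hlk]
      simp only []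
      rw [show ((pvW d os).length + 1) * ((pvW d os).length + 1) + 1 = (((pvW d os).length + 1) * ((pvW d os).length + 1)) + 1 from rfl, loopB]
      simp
    | some ch =>
      rw [hlk] at hopt
      simp only [Option.all_some, decide_eq_true_eq] at hopt
      rw [show (pvW d os).length + 2 = ((pvW d os).length + 1) + 1 from by omega, goA, expandB, hlk]
      simp only [hopt, if_true]
      rw [show ((pvW d os).length + 1) * ((pvW d os).length + 1) + 1 = (((pvW d os).length + 1) * ((pvW d os).length + 1)) + 1 from rfl, loopB]
      by_cases hs : steps + 1 = -1
      · simp [hs]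
      · simp [hs]
  · -- every orbiting node has a source: the full simulation applies
    have hpre' : ∀ p ∈ d, (List.lookup p.1 os).isSome = true := by
      intro p hp
      exact List.all_eq_true.mp hall p hp
    have hsim := pvSIM d os dest hpre' (pvMu d os (PySem.Set.add v cur)) v cur steps [] (le_refl _) (by intro q hq; simp at hq)
    -- B's top-level expression equals the simulation's left-hand side
    have hB : (match expandB d os dest v cur steps [] with
        | (h, v1, st1) => loopB d os dest (((pvW d os).length + 1) * ((pvW d os).length + 1) + 1) h v1 st1)
        = (match expandB d os dest v cur steps [] with
           | (h, v', st') => if h = -1 then pvLB d os dest v' st' else h) := by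
      cases hex : expandB d os dest v cur steps [] with
      | mk h q =>
        obtain ⟨v1, st1⟩ := q
        have habs := pvExpand_abs d os dest v cur steps [] (by intro q hq; simp at hq)
        rw [hex] at habs
        dsimp only at habs
        simp only []
        by_cases hh : h = -1
        · subst hh
          simp only [if_pos rfl]
          apply pvLoopB_eq_LB d os dest _ v1 st1 habs.1
          have hmu := pvMu_le d os v1
          have hmul : ((pvW d os).length + 1) * (pvMu d os v1) ≤ ((pvW d os).length + 1) * (pvW d os).length :=
            Nat.mul_le_mul_left _ hmu
          have hring : ((pvW d os).length + 1) * ((pvW d os).length + 1) = ((pvW d os).length + 1) * (pvW d os).length + (pvW d os).length + 1 := by ring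
          simp only [pvBnd, List.length_nil] at habs ⊢
          omega
        · rw [if_neg hh]
          exact pvLoopB_hit d os dest _ h v1 st1 hh (by omega)
    rw [hB, hsim]
    cases hga : goA d os dest ((pvW d os).length + 2) v cur steps with
    | mk r v2 =>
      simp only []
      by_cases hr : r = -1
      · subst hr
        simp [pvLB_nil]
      · rw [if_neg hr]
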